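-- pv_equiv track=rewrite | github.com/the-Fish2/fizzbuzz-var-extraction | llm_interface/generate_tests.py | case_insensitive_split
-- ===== SOURCE A (Python) =====
-- def case_insensitive_split(text_to_split: str, split_str: str):
--     """
--     Splits an input text string based on a split string that ignores the case of both the text to split and the string that splits the text. For example, case_insensitive_split("1 HELLO 2 hello 3 HelLo", "hello") will give [1, 2, 3]
--     """
--     split_text = []
--     last_ind = 0
--     for start_ind in range(len(text_to_split)):
--         if text_to_split[start_ind : start_ind + len(split_str)].lower() == split_str.lower():
--             split_text.append(text_to_split[last_ind:start_ind])
--             last_ind = start_ind + len(split_str)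
--     return split_text
-- ===== SOURCE B (Python) =====
-- def case_insensitive_split(text_to_split: str, split_str: str):
--     # Streaming one-pass: build each segment character by character with a skip
--     # counter for the characters consumed by a just-matched separator; no index
--     # bookkeeping (last_ind) and no slicing out of segments at all.
--     low = text_to_split.lower()
--     needle = split_str.lower()
--     k = len(needle)
--     out = []
--     cur = []
--     skip = 0
--     for i, ch in enumerate(text_to_split):
--         if low.startswith(needle, i):
--             out.append(''.join(cur))
--             cur = []
--             skip = k
--         if skip > 0:
--             skip -= 1
--         else:
--             cur.append(ch)
--     return out
-- ===== Notes on version B (the rewrite author's own statement) =====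
-- stated objective: faster
-- what changed: B is a streaming one-pass fold that assembles each segment character by character with a skip counter for the characters consumed by a just-matched separator, instead of A's last_ind index bookkeeping and per-segment text slicing; matches are detected with startswith on a once-lowered text instead of building and lowering a fresh slice at every position.
import Mathlib
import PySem

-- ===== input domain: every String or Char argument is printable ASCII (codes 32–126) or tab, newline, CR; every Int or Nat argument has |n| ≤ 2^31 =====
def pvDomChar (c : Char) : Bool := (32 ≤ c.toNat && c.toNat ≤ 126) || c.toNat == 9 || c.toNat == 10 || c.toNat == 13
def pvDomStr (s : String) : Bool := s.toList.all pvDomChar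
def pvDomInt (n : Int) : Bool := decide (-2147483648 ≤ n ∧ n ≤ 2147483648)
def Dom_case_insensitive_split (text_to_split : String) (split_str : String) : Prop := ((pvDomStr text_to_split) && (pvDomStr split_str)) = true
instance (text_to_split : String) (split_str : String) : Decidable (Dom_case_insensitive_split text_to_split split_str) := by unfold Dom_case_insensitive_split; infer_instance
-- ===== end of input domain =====

-- B replaces A's last_ind bookkeeping and per-segment slicing by a streaming one-pass fold that
-- builds each segment character by character with a skip counter, matching via startswith on a
-- once-lowered text instead of lowering a fresh slice per position (measured faster, constant factor).

-- ===== PORT A =====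
-- literal transliteration of A: one loop over range(len(text)), lowering each slice on the fly,
-- cutting segments out of the text with slices at last_ind
def case_insensitive_split (text_to_split : String) (split_str : String) : List String :=
  ((PySem.List.pyRange 0 (PySem.Str.len text_to_split) 1).foldl
    (fun (st : List String × Int) start_ind =>
      if PySem.Str.lower (PySem.Str.slice text_to_split (some start_ind)
            (some (start_ind + PySem.Str.len split_str))) == PySem.Str.lower split_str then
        (st.1 ++ [PySem.Str.slice text_to_split (some st.2) (some start_ind)],
         start_ind + PySem.Str.len split_str)
      else st) ([], 0)).1

-- ===== PORT B =====
-- literal transliteration of B: lower text and needle once, then one fold over enumerate(text)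
-- with state (out, cur, skip).  'low.startswith(needle, i)' is ported as startswith on the
-- dropped suffix (exact for the 0 ≤ i < len(text) indices enumerate produces).
def case_insensitive_split_alt (text_to_split : String) (split_str : String) : List String :=
  let low := PySem.Chars.lower text_to_split.toList
  let needle := PySem.Chars.lower split_str.toList
  let k := needle.length
  ((PySem.List.enumerate text_to_split.toList 0).foldl
    (fun (st : List String × List Char × Nat) (p : Int × Char) =>
      let st2 := if PySem.Chars.startswith (low.drop p.1.toNat) needle then
          (st.1 ++ [String.ofList st.2.1], ([] : List Char), k)
        else st
      if st2.2.2 > 0 then (st2.1, st2.2.1, st2.2.2 - 1)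
      else (st2.1, st2.2.1 ++ [p.2], st2.2.2)) ([], [], 0)).1

-- ===== PRECONDITION & SPEC =====
def Spec_case_insensitive_split (text_to_split : String) (split_str : String) (out : List String) : Prop := out = case_insensitive_split_alt text_to_split split_str
instance (text_to_split : String) (split_str : String) (out : List String) : Decidable (Spec_case_insensitive_split text_to_split split_str out) := by unfold Spec_case_insensitive_split; infer_instance

-- ===== CLAIM (what is proved, stated in full; the proofs are below) =====
def Claim_equal_case_insensitive_split : Prop := ∀ (text_to_split : String) (split_str : String), Dom_case_insensitive_split text_to_split split_str → Spec_case_insensitive_split text_to_split split_str (case_insensitive_split text_to_split split_str)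

-- ===== LEMMAS AND PROOFS =====

theorem pv_slice_map {α β : Type} (f : α → β) (xs : List α) (a b : Option Int) :
    PySem.List.slice (xs.map f) a b = (PySem.List.slice xs a b).map f := by
  cases a <;> cases b <;>
    simp [PySem.List.slice, List.map_take, List.map_drop]

theorem pv_slice_lower (t : String) (a b : Option Int) :
    PySem.Str.slice (PySem.Str.lower t) a b = PySem.Str.lower (PySem.Str.slice t a b) := by
  apply String.ext
  simp [PySem.Str.slice, PySem.Str.lower, PySem.Chars.lower, PySem.Chars.slice_eq_listSlice,
    pv_slice_map]

theorem pv_cond (t s : String) (i : Nat) :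
    (PySem.Str.lower (PySem.Str.slice t (some (i : Int))
        (some ((i : Int) + PySem.Str.len s))) == PySem.Str.lower s)
      = PySem.Chars.startswith ((PySem.Chars.lower t.toList).drop i)
          (PySem.Chars.lower s.toList) := by
  rw [← pv_slice_lower, Bool.eq_iff_iff, beq_iff_eq, PySem.Chars.startswith_iff,
    List.prefix_iff_eq_take, ← String.toList_inj]
  have hl : PySem.Str.len s = ((s.toList.length : Nat) : Int) := by simp [PySem.Str.len_eq]
  rw [hl]
  have : ((i : Int) + ((s.toList.length : Nat) : Int)) = ((i + s.toList.length : Nat) : Int) := by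
    push_cast; ring
  rw [this]
  simp [PySem.Str.lower, PySem.Chars.lower, PySem.Str.slice, PySem.Chars.slice_eq_listSlice]
  rw [PySem.List.slice_natCast_add]
  exact eq_comm

theorem pv_slice_eq_mk (t : String) (a b : Int) (ha : 0 ≤ a) (hb : 0 ≤ b) :
    PySem.Str.slice t (some a) (some b)
      = String.ofList ((t.toList.drop a.toNat).take (b.toNat - a.toNat)) := by
  apply String.ext
  simp [PySem.Str.slice, PySem.Chars.slice_eq_listSlice, PySem.List.slice_toNat t.toList ha hb]

theorem pv_main (t s : String) :
    ∀ (cs : List Char) (i : Nat), cs = t.toList.drop i →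
    ∀ (out : List String) (last : Int), 0 ≤ last →
    ((PySem.List.pyRange (i : Int) (t.toList.length : Int) 1).foldl
      (fun (st : List String × Int) start_ind =>
        if PySem.Str.lower (PySem.Str.slice t (some start_ind)
              (some (start_ind + PySem.Str.len s))) == PySem.Str.lower s then
          (st.1 ++ [PySem.Str.slice t (some st.2) (some start_ind)],
           start_ind + PySem.Str.len s)
        else st) (out, last)).1
    = ((PySem.List.enumerate cs (i : Int)).foldl
        (fun (st : List String × List Char × Nat) (p : Int × Char) =>
          let st2 := if PySem.Chars.startswith
                ((PySem.Chars.lower t.toList).drop p.1.toNat) (PySem.Chars.lower s.toList) then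
              (st.1 ++ [String.ofList st.2.1], ([] : List Char), (PySem.Chars.lower s.toList).length)
            else st
          if st2.2.2 > 0 then (st2.1, st2.2.1, st2.2.2 - 1)
          else (st2.1, st2.2.1 ++ [p.2], st2.2.2))
        (out, (t.toList.drop last.toNat).take (i - last.toNat), (last - i).toNat)).1 := by
  intro cs
  induction cs with
  | nil =>
    intro i hcs out last hlast
    have hn : t.toList.length ≤ i := by
      have := List.drop_eq_nil_iff.mp hcs.symm
      omega
    rw [PySem.List.pyRange_one_eq_nil (by exact_mod_cast hn)]
    simp [PySem.List.enumerate]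
  | cons c cs' ih =>
    intro i hcs out last hlast
    have hi : i < t.toList.length := by
      by_contra h
      rw [List.drop_eq_nil_iff.mpr (by omega)] at hcs
      simp at hcs
    have hdrop : t.toList.drop i = t.toList[i] :: t.toList.drop (i + 1) :=
      List.drop_eq_getElem_cons hi
    rw [hdrop] at hcs
    injection hcs with hc hcs'
    have hk : (PySem.Chars.lower s.toList).length = s.toList.length := by
      simp [PySem.Chars.lower]
    have hm : PySem.Str.len s = ((s.toList.length : Nat) : Int) := by
      simp [PySem.Str.len_eq]
    have hcast : ((i : Int) + 1) = ((i + 1 : Nat) : Int) := by push_cast; ring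
    rw [PySem.List.pyRange_one_cons (by exact_mod_cast hi), PySem.List.enumerate_cons]
    simp only [List.foldl_cons, pv_cond t s i]
    cases hb : PySem.Chars.startswith ((PySem.Chars.lower t.toList).drop i)
        (PySem.Chars.lower s.toList) with
    | true =>
      simp only [hb, Int.toNat_natCast, if_pos]
      rw [hcast, pv_slice_eq_mk t last (i : Int) hlast (Int.natCast_nonneg i), Int.toNat_natCast]
      have h2 : (0:Int) ≤ (i : Int) + PySem.Str.len s := by rw [hm]; positivity
      have H := ih (i+1) hcs'
        (out ++ [String.ofList ((t.toList.drop last.toNat).take (i - last.toNat))])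
        ((i : Int) + PySem.Str.len s) h2
      have hL : (((i:Int) + PySem.Str.len s)).toNat = i + s.toList.length := by rw [hm]; omega
      have hsk : ((((i:Int) + PySem.Str.len s)) - ((i+1 : Nat) : Int)).toNat
          = s.toList.length - 1 := by rw [hm]; omega
      rw [hL, hsk] at H
      rcases Nat.eq_zero_or_pos s.toList.length with h0 | h0
      · simp only [hk, h0, Nat.add_zero, Nat.zero_sub, gt_iff_lt, lt_irrefl, if_false,
          List.nil_append] at H ⊢
        rw [hc]
        rw [show i + 1 - i = 1 from by omega, hdrop] at H
        simp only [List.take_succ_cons, List.take_zero] at H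
        exact H
      · simp only [hk, gt_iff_lt] at H ⊢
        rw [if_pos h0]
        rw [show i + 1 - (i + s.toList.length) = 0 from by omega, List.take_zero] at H
        exact H
    | false =>
      simp only [hb, Int.toNat_natCast, Bool.false_eq_true, if_false]
      rw [hcast]
      have H := ih (i+1) hcs' out last hlast
      by_cases hpos : 0 < (last - (i:Int)).toNat
      · simp only [gt_iff_lt] at H ⊢
        rw [if_pos hpos]
        rw [show (i+1) - last.toNat = 0 from by omega,
          show (last - ((i+1 : Nat) : Int)).toNat = (last - (i:Int)).toNat - 1 from by omega] at H
        rw [show i - last.toNat = 0 from by omega]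
        exact H
      · have h0 : (last - (i:Int)).toNat = 0 := by omega
        simp only [gt_iff_lt] at H ⊢
        rw [if_neg hpos]
        have e4 : (t.toList.drop last.toNat).take ((i+1) - last.toNat)
            = (t.toList.drop last.toNat).take (i - last.toNat) ++ [c] := by
          rw [show (i+1) - last.toNat = (i - last.toNat) + 1 from by omega, List.take_add_one]
          have hg : (t.toList.drop last.toNat)[i - last.toNat]? = some c := by
            rw [List.getElem?_drop, show last.toNat + (i - last.toNat) = i from by omega,
              List.getElem?_eq_getElem hi, hc]
          rw [hg]
          rfl
        rw [e4, show (last - ((i+1 : Nat) : Int)).toNat = 0 from by omega] at H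
        rw [h0]
        exact H

-- ===== VERDICT (by name: the statement is the Claim_ definition above) =====
theorem case_insensitive_split_spec : Claim_equal_case_insensitive_split := by
  intro t s _
  unfold Spec_case_insensitive_split case_insensitive_split case_insensitive_split_alt
  have h := pv_main t s t.toList 0 (by simp) [] 0 le_rfl
  simpa using h
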